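-- pv_equiv track=rewrite | github.com/6210qwe/leetcode_py | leetcode_solutions/by_id/q2517.py | maxScoreAfterOperations
-- ===== SOURCE A (Python) =====
-- from typing import List, Optional
--
-- def maxScoreAfterOperations(n: int, edges: List[List[int]], values: List[int]) -> int:
--     # 构建树的邻接表表示
--     tree = [[] for _ in range(n)]
--     for u, v in edges:
--         tree[u].append(v)
--         tree[v].append(u)
--
--     def dfs(node: int, parent: int) -> (int, int):
--         # 选择当前节点的最大权值和
--         choose = values[node]
--         # 不选择当前节点的最大权值和
--         not_choose = 0
--
--         for child in tree[node]:
--             if child == parent: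
--                 continue
--             child_choose, child_not_choose = dfs(child, node)
--             choose += child_not_choose
--             not_choose += max(child_choose, child_not_choose)
--
--         return choose, not_choose
--
--     # 从根节点开始 DFS
--     root_choose, root_not_choose = dfs(0, -1)
--     return max(root_choose, root_not_choose)
-- ===== SOURCE B (Python) =====
-- def maxScoreAfterOperations(n, edges, values):
--     adj = [[] for _ in range(n)]
--     for u, v in edges:
--         adj[u].append(v)
--         adj[v].append(u)
--     # phase 1: iterative DFS from node 0, recording visit order and each node's parent
--     order = []
--     parent = [-1] * n
--     stack = [(0, -1)]
--     while stack:
--         node, par = stack.pop()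
--         order.append(node)
--         parent[node] = par
--         for nb in adj[node]:
--             if nb != par:
--                 stack.append((nb, node))
--     # phase 2: fold each node's DP states into its parent, walking the order backwards
--     choose = values[:]
--     not_choose = [0] * n
--     for node in reversed(order):
--         par = parent[node]
--         if par != -1:
--             choose[par] += not_choose[node]
--             not_choose[par] += max(choose[node], not_choose[node])
--     return max(choose[0], not_choose[0])
-- ===== Notes on version B (the rewrite author's own statement) =====
-- stated objective: alternative
-- what changed: The recursive tree DP is replaced by a two-phase iterative pass: an explicit-stack DFS first records the visit order and each node's parent, then a single backward walk over that order folds per-node (choose, not_choose) arrays into the parent, removing recursion entirely.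
-- outside the precondition, e.g. on maxScoreAfterOperations(3, [[0, 1], [0, 1], [1, 2]], [0, 0, 1]): A returns 2, B returns 3; on maxScoreAfterOperations(2, [[0, -1]], [5, 7]): A returns 5, B returns 5
import Mathlib
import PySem

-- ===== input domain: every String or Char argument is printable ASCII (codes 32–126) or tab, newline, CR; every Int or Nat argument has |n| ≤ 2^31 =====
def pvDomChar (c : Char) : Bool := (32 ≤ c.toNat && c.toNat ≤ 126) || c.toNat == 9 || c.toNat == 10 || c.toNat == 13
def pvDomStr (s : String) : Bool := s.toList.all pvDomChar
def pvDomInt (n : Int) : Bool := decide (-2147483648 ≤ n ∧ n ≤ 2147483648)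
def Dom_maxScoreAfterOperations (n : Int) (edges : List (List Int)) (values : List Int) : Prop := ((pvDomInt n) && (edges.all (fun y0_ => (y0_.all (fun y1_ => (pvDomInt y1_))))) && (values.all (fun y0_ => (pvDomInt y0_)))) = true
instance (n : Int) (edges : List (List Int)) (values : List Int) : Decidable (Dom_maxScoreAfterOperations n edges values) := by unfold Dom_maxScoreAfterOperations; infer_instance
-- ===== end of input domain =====

-- B replaces A's recursive DFS by a two-phase iterative pass (stack DFS recording order+parents,
-- then one backward array fold); equivalence is proved on the inputs where A returns normally (Pre_).

-- ===== PORT A =====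
-- Both Pythons build the adjacency table with the same two `append`s per edge; the builder is shared.
-- `tree[u].append(v)` is a guarded in-place update: inside Pre_ every index is in range
-- (outside it Python raises or wraps a negative index; Pre_ excludes those inputs).
-- Python's negative-index wraparound: tree[u] with u < 0 is tree[u + len]
def pvWrapI (L : Nat) (u : Int) : Int := if u < 0 then u + L else u

def pvApp (t : List (List Int)) (u v : Int) : List (List Int) :=
  let i := pvWrapI t.length u
  if 0 ≤ i ∧ i.toNat < t.length then t.set i.toNat ((t.getD i.toNat []) ++ [v]) else t

def pvAdj (n : Int) (edges : List (List Int)) : List (List Int) :=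
  edges.foldl (fun t e =>
    match e with
    | [u, v] => pvApp (pvApp t u v) v u
    | _ => t) (List.replicate n.toNat [])

-- `tree[node]` / `values[node]` reads (in range inside Pre_; Python raises outside it)
def pvRow (t : List (List Int)) (v : Int) : List Int := if 0 ≤ v then t.getD v.toNat [] else []
def pvVal (l : List Int) (v : Int) : Int := if 0 ≤ v then l.getD v.toNat 0 else 0

-- A's recursive dfs, fuel = recursion-depth budget (n+1 levels suffice inside Pre_)
def pvDfsA (tree : List (List Int)) (values : List Int) : Nat → Int → Int → Int × Int
  | 0, _, _ => (0, 0)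
  | fuel+1, node, parent =>
    (pvRow tree node).foldl
      (fun cn child =>
        if child = parent then cn
        else
          let r := pvDfsA tree values fuel child node
          (cn.1 + r.2, cn.2 + max r.1 r.2))
      (pvVal values node, 0)

def maxScoreAfterOperations (n : Int) (edges : List (List Int)) (values : List Int) : Int :=
  let tree := pvAdj n edges
  let r := pvDfsA tree values (n.toNat + 1) 0 (-1)
  max r.1 r.2

-- ===== PORT B =====
-- `parent[node] = par` (guarded write, in range inside Pre_)
def pvSetAt (l : List Int) (i v : Int) : List Int :=
  if 0 ≤ i ∧ i.toNat < l.length then l.set i.toNat v else l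

-- phase 1: the `while stack` loop; the Python stack's top (list end) is the head here,
-- so pushing the kept neighbours is a foldl of conses.  Fuel = loop-iteration budget
-- (at most n pops happen inside Pre_).
def pvVisit (adj : List (List Int)) : Nat → List (Int × Int) → List Int → List Int → List Int × List Int
  | 0, _, order, parent => (order, parent)
  | _+1, [], order, parent => (order, parent)
  | fuel+1, (node, par) :: rest, order, parent =>
      pvVisit adj fuel
        ((pvRow adj node).foldl (fun s nb => if nb = par then s else (nb, node) :: s) rest)
        (order ++ [node]) (pvSetAt parent node par)

-- phase 2: one step of the backward fold (the body of `for node in reversed(order)`)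
def pvStep (parent : List Int) (cn : List Int × List Int) (node : Int) : List Int × List Int :=
  let par := pvVal parent node
  if par = -1 then cn
  else
    let ch := pvSetAt cn.1 par (pvVal cn.1 par + pvVal cn.2 node)
    let nc := pvSetAt cn.2 par (pvVal cn.2 par + max (pvVal ch node) (pvVal cn.2 node))
    (ch, nc)

def maxScoreAfterOperations_alt (n : Int) (edges : List (List Int)) (values : List Int) : Int :=
  let adj := pvAdj n edges
  let op := pvVisit adj (n.toNat + 2) [(0, -1)] [] (List.replicate n.toNat (-1))
  let res := op.1.reverse.foldl (pvStep op.2) (values, List.replicate n.toNat 0)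
  max (pvVal res.1 0) (pvVal res.2 0)

-- ===== PRECONDITION & SPEC =====
-- Helpers for Pre_ (independent of both ports): the neighbour multiset of a node read
-- directly off the edge list, and a breadth-first depth labelling of node 0's component.
def pvEdgeOK (n : Int) (e : List Int) : Bool :=
  match e with
  | [u, v] => decide (-n ≤ u ∧ u < n ∧ -n ≤ v ∧ v < n)
  | _ => false

def pvNbrE (edges : List (List Int)) (v : Int) : List Int :=
  edges.flatMap (fun e =>
    match e with
    | [a, b] => (if a = v then [b] else []) ++ (if b = v then [a] else [])
    | _ => [])

def pvLook (l : List (Int × Nat)) (v : Int) : Option Nat := (l.find? (fun p => p.1 == v)).map (·.2)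

-- BFS layers from node 0 (edges.length + 2 rounds reach every node of node 0's component
-- whatever its depth); this decides a property of the input graph (how deep node 0's
-- component is and how its nodes interconnect), it does not re-run either port's DP.
def pvBFSgo (edges : List (List Int)) : Nat → Nat → List (Int × Nat) → List Int → List (Int × Nat)
  | 0, _, dep, _ => dep
  | _+1, _, dep, [] => dep
  | r+1, k, dep, frontier =>
      let st := frontier.foldl (fun st' v =>
          (pvNbrE edges v).foldl (fun st'' u =>
              if (pvLook st''.1 u).isNone then (st''.1 ++ [(u, k+1)], st''.2 ++ [u]) else st'')
            st') (dep, ([] : List Int))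
      pvBFSgo edges r (k+1) st.1 st.2

def pvDepList (edges : List (List Int)) : List (Int × Nat) :=
  pvBFSgo edges (edges.length + 2) 0 [(0, 0)] [0]

-- an edge with a negative endpoint must stay clear of node 0's component (keys of the
-- depth list): its two wrapped endpoints are not component nodes
def pvWrapOK (n : Int) (keys : List Int) (e : List Int) : Bool :=
  match e with
  | [u, v] =>
      if 0 ≤ u ∧ 0 ≤ v then true
      else decide (pvWrapI n.toNat u ∉ keys ∧ pvWrapI n.toNat v ∉ keys)
  | _ => false

def pvAdjDepOK (dep : List (Int × Nat)) (d : Nat) (u : Int) : Bool :=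
  match pvLook dep u with
  | some du => du == d + 1 || du + 1 == d
  | none => false

-- Pre_ = the contract under which A returns normally: every edge is a pair of in-range
-- endpoints (negative ones wrap, Python-style, and must stay outside node 0's component),
-- node 0's component is a simple tree (each non-root member has exactly one neighbour
-- closer to 0, every incident edge changes the BFS depth by exactly 1 — so no cycles,
-- self-loops or duplicated edges around node 0), and the values list covers the component.
-- It excludes some inputs on which A still returns: duplicated/self-loop/negative-aliased
-- edges inside node 0's component, where the totals depend on the accidental multiplicity
-- and raw-vs-wrapped node identity with which each program re-walks the repeated edge
-- (see the cited examples).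
def Pre_maxScoreAfterOperations (n : Int) (edges : List (List Int)) (values : List Int) : Prop :=
  (∀ e ∈ edges, pvEdgeOK n e = true) ∧
  (∀ e ∈ edges, pvWrapOK n ((pvDepList edges).map Prod.fst) e = true) ∧
  ((pvDepList edges).map Prod.fst).Nodup ∧
  pvLook (pvDepList edges) 0 = some 0 ∧
  ∀ p ∈ pvDepList edges,
    0 ≤ p.1 ∧ p.1 < n ∧ p.1 < (values.length : Int) ∧
    (p.2 = 0 → p.1 = 0) ∧
    (∀ u ∈ pvNbrE edges p.1, pvAdjDepOK (pvDepList edges) p.2 u = true) ∧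
    (pvNbrE edges p.1).countP (fun u => pvLook (pvDepList edges) u == some (p.2 - 1)) =
      (if p.2 = 0 then 0 else 1)

instance (n : Int) (edges : List (List Int)) (values : List Int) : Decidable (Pre_maxScoreAfterOperations n edges values) := by
  unfold Pre_maxScoreAfterOperations; infer_instance

def pvWitness_maxScoreAfterOperations : Int × List (List Int) × List Int :=
  (3, [[0, 1], [1, 2]], [1, 2, 3])

def Spec_maxScoreAfterOperations (n : Int) (edges : List (List Int)) (values : List Int) (out : Int) : Prop := out = maxScoreAfterOperations_alt n edges values
instance (n : Int) (edges : List (List Int)) (values : List Int) (out : Int) : Decidable (Spec_maxScoreAfterOperations n edges values out) := by unfold Spec_maxScoreAfterOperations; infer_instance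

-- ===== CLAIM (what is proved, stated in full; the proofs are below) =====
def Claim_equal_maxScoreAfterOperations : Prop := ∀ (n : Int) (edges : List (List Int)) (values : List Int), Dom_maxScoreAfterOperations n edges values → Pre_maxScoreAfterOperations n edges values → Spec_maxScoreAfterOperations n edges values (maxScoreAfterOperations n edges values)

-- ===== LEMMAS AND PROOFS =====

-- ---- generic list facts ----

theorem pv_getD_set (l : List Int) (i j : Nat) (v : Int) :
    (l.set i v).getD j 0 = if i = j ∧ i < l.length then v else l.getD j 0 := by
  simp only [List.getD_eq_getElem?_getD, List.getElem?_set]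
  split_ifs with h1 h2 <;> simp_all <;> omega

theorem pv_getD_setL (l : List (List Int)) (i j : Nat) (v : List Int) :
    (l.set i v).getD j [] = if i = j ∧ i < l.length then v else l.getD j [] := by
  simp only [List.getD_eq_getElem?_getD, List.getElem?_set]
  split_ifs with h1 h2 <;> simp_all <;> omega

theorem pv_nodup_flatMap (l : List Int) (f : Int → List Int) (hl : l.Nodup)
    (hf : ∀ x ∈ l, (f x).Nodup)
    (hd : l.Pairwise (fun a b => ∀ x ∈ f a, x ∉ f b)) : (l.flatMap f).Nodup := by
  induction l with
  | nil => simp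
  | cons a t ih =>
    simp only [List.flatMap_cons, List.nodup_append]
    refine ⟨hf a (by simp), ih hl.of_cons (fun x hx => hf x (by simp [hx])) hd.of_cons, ?_⟩
    intro x hx y hy hxy
    subst hxy
    rcases List.mem_flatMap.mp hy with ⟨b, hb, hxb⟩
    exact (List.pairwise_cons.mp hd).1 b hb x hx hxb

theorem pv_reverse_flatMap (l : List Int) (f : Int → List Int) :
    (l.flatMap f).reverse = l.reverse.flatMap (fun x => (f x).reverse) := by
  induction l with
  | nil => simp
  | cons a t ih => simp [List.flatMap_cons, ih]

-- ---- lookup in the depth list ----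

theorem pv_look_mem {l : List (Int × Nat)} {v : Int} {d : Nat} (h : pvLook l v = some d) :
    (v, d) ∈ l := by
  unfold pvLook at h
  rcases Option.map_eq_some_iff.mp h with ⟨p, hp, hd⟩
  have hmem := List.mem_of_find?_eq_some hp
  have hpred := List.find?_some hp
  have : p.1 = v := by simpa using hpred
  cases p; simp_all

-- ---- the certificate bundle extracted from Pre_ ----

structure PvC where
  n : Int
  edges : List (List Int)
  values : List Int
  hvalid : ∀ e ∈ edges, pvEdgeOK n e = true
  hwrap : ∀ e ∈ edges, pvWrapOK n ((pvDepList edges).map Prod.fst) e = true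
  hnodup : ((pvDepList edges).map Prod.fst).Nodup
  hroot : pvLook (pvDepList edges) 0 = some 0
  hnode : ∀ p ∈ pvDepList edges,
    0 ≤ p.1 ∧ p.1 < n ∧ p.1 < (values.length : Int) ∧
    (p.2 = 0 → p.1 = 0) ∧
    (∀ u ∈ pvNbrE edges p.1, pvAdjDepOK (pvDepList edges) p.2 u = true) ∧
    (pvNbrE edges p.1).countP (fun u => pvLook (pvDepList edges) u == some (p.2 - 1)) =
      (if p.2 = 0 then 0 else 1)

def PvC.dp (c : PvC) (v : Int) : Option Nat := pvLook (pvDepList c.edges) v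
def PvC.nb (c : PvC) (v : Int) : List Int := pvNbrE c.edges v
def PvC.pOf (c : PvC) (v : Int) : Int :=
  match c.dp v with
  | some (d+1) => ((c.nb v).find? (fun u => c.dp u == some d)).getD (-1)
  | _ => -1

theorem pvc_node (c : PvC) {v : Int} {d : Nat} (h : c.dp v = some d) :
    0 ≤ v ∧ v < c.n ∧ v < (c.values.length : Int) ∧
    (d = 0 → v = 0) ∧
    (∀ u ∈ c.nb v, pvAdjDepOK (pvDepList c.edges) d u = true) ∧
    (c.nb v).countP (fun u => c.dp u == some (d - 1)) = (if d = 0 then 0 else 1) := by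
  have := c.hnode (v, d) (pv_look_mem h)
  simpa [PvC.nb, PvC.dp] using this

theorem pvc_bounds (c : PvC) {v : Int} {d : Nat} (h : c.dp v = some d) :
    0 ≤ v ∧ v < c.n ∧ v < (c.values.length : Int) :=
  ⟨(pvc_node c h).1, (pvc_node c h).2.1, (pvc_node c h).2.2.1⟩

theorem pvc_root (c : PvC) : c.dp 0 = some 0 := c.hroot

theorem pvc_zero (c : PvC) {v : Int} (h : c.dp v = some 0) : v = 0 :=
  (pvc_node c h).2.2.2.1 rfl

-- every neighbour of a labelled node is labelled one level up or down
theorem pvc_nbr (c : PvC) {v : Int} {d : Nat} (h : c.dp v = some d) {u : Int}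
    (hu : u ∈ c.nb v) : ∃ du, c.dp u = some du ∧ (du = d + 1 ∨ du + 1 = d) := by
  have := (pvc_node c h).2.2.2.2.1 u hu
  unfold pvAdjDepOK at this
  rcases hdu : pvLook (pvDepList c.edges) u with _ | du
  · rw [hdu] at this; simp at this
  · rw [hdu] at this
    refine ⟨du, hdu, ?_⟩
    simpa using this

theorem pvc_countP (c : PvC) {v : Int} {d : Nat} (h : c.dp v = some d) :
    (c.nb v).countP (fun u => c.dp u == some (d - 1)) = (if d = 0 then 0 else 1) :=
  (pvc_node c h).2.2.2.2.2

-- parent of a depth-(d+1) node: labelled d, adjacent, and unique as such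
theorem pvc_parent (c : PvC) {v : Int} {d : Nat} (h : c.dp v = some (d + 1)) :
    c.dp (c.pOf v) = some d ∧ c.pOf v ∈ c.nb v := by
  have hc : (c.nb v).countP (fun u => c.dp u == some d) = 1 := by
    have := pvc_countP c h; simpa using this
  have hex : ∃ u ∈ c.nb v, (fun u => c.dp u == some d) u = true := by
    by_contra hno
    push_neg at hno
    have : (c.nb v).countP (fun u => c.dp u == some d) = 0 := by
      apply List.countP_eq_zero.mpr
      intro u hu
      simp only [Bool.not_eq_true]
      exact Bool.not_eq_true _ ▸ (by simpa using hno u hu)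
    omega
  have hsome : ((c.nb v).find? (fun u => c.dp u == some d)).isSome := List.find?_isSome.mpr hex
  rcases Option.isSome_iff_exists.mp hsome with ⟨w, hw⟩
  have hwmem := List.mem_of_find?_eq_some hw
  have hwpred : c.dp w = some d := by simpa using List.find?_some hw
  have hpOf : c.pOf v = w := by
    unfold PvC.pOf
    rw [h]
    show (List.find? (fun u => c.dp u == some d) (c.nb v)).getD (-1) = w
    rw [hw]
    rfl
  rw [hpOf]; exact ⟨hwpred, hwmem⟩

theorem pvc_parent_unique (c : PvC) {v : Int} {d : Nat} (h : c.dp v = some (d + 1))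
    {u : Int} (hu : u ∈ c.nb v) (hud : c.dp u = some d) : u = c.pOf v := by
  have hc : ((c.nb v).filter (fun u => c.dp u == some d)).length = 1 := by
    have := pvc_countP c h
    rw [List.countP_eq_length_filter] at this
    simpa using this
  rcases List.length_eq_one_iff.mp hc with ⟨x, hx⟩
  have h1 : u ∈ (c.nb v).filter (fun u => c.dp u == some d) :=
    List.mem_filter.mpr ⟨hu, by simp [hud]⟩
  have h2 : c.pOf v ∈ (c.nb v).filter (fun u => c.dp u == some d) := by
    have := pvc_parent c h
    exact List.mem_filter.mpr ⟨this.2, by simp [this.1]⟩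
  rw [hx] at h1 h2
  simp at h1 h2; omega

theorem pvc_pOf_root (c : PvC) {v : Int} (h : c.dp v = some 0) : c.pOf v = -1 := by
  unfold PvC.pOf; rw [h]

-- symmetry of the neighbour multiset
theorem pv_nbrE_count (edges : List (List Int)) (u v : Int) :
    (pvNbrE edges v).count u = (pvNbrE edges u).count v := by
  induction edges with
  | nil => simp [pvNbrE]
  | cons e t ih =>
    have hsplit : ∀ w, pvNbrE (e :: t) w =
        (match e with
         | [a, b] => (if a = w then [b] else []) ++ (if b = w then [a] else [])
         | _ => []) ++ pvNbrE t w := by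
      intro w; simp [pvNbrE]
    rw [hsplit u, hsplit v, List.count_append, List.count_append, ih]
    congr 1
    match e with
    | [] => simp
    | [a] => simp
    | a :: b :: c :: r => simp
    | [a, b] =>
      simp only [List.count_append]
      by_cases hav : a = v <;> by_cases hbv : b = v <;> by_cases hau : a = u <;> by_cases hbu : b = u <;>
        simp_all [List.count_singleton, List.count_cons] <;> omega

theorem pvc_nb_symm (c : PvC) {u v : Int} (h : u ∈ c.nb v) : v ∈ c.nb u := by
  have h1 : 1 ≤ (c.nb v).count u := List.one_le_count_iff.mpr h
  have := pv_nbrE_count c.edges u v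
  unfold PvC.nb at *
  have : 1 ≤ (pvNbrE c.edges u).count v := by omega
  exact List.one_le_count_iff.mp this

-- a non-parent neighbour of a depth-d node is a depth-(d+1) child whose parent is that node
theorem pvc_child (c : PvC) {v : Int} {d : Nat} (h : c.dp v = some d) {u : Int}
    (hu : u ∈ c.nb v) (hne : u ≠ c.pOf v) : c.dp u = some (d + 1) ∧ c.pOf u = v := by
  rcases pvc_nbr c h hu with ⟨du, hdu, hcase⟩
  have hdueq : du = d + 1 := by
    rcases hcase with hc | hc
    · exact hc
    · exfalso
      have hd1 : d = du + 1 := hc.symm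
      exact hne (pvc_parent_unique c (hd1 ▸ h) hu hdu)
  subst hdueq
  refine ⟨hdu, ?_⟩
  exact (pvc_parent_unique c hdu (pvc_nb_symm c hu) h).symm

-- each node occurs exactly once in its children's neighbour lists
theorem pvc_count_parent (c : PvC) {u : Int} {d : Nat} (h : c.dp u = some (d + 1)) :
    (c.nb u).count (c.pOf u) = 1 := by
  have hpar := pvc_parent c h
  have hle : (c.nb u).count (c.pOf u) ≤ (c.nb u).countP (fun w => c.dp w == some d) := by
    rw [List.count_eq_countP]
    apply List.countP_mono_left
    intro w _ hw
    have : w = c.pOf u := by simpa using hw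
    simp [this, hpar.1]
  have hc : (c.nb u).countP (fun w => c.dp w == some d) = 1 := by
    have := pvc_countP c h; simpa using this
  have hge : 1 ≤ (c.nb u).count (c.pOf u) := List.one_le_count_iff.mpr hpar.2
  omega

theorem pv_witness_ok :
    Dom_maxScoreAfterOperations pvWitness_maxScoreAfterOperations.1 pvWitness_maxScoreAfterOperations.2.1 pvWitness_maxScoreAfterOperations.2.2 ∧
    Pre_maxScoreAfterOperations pvWitness_maxScoreAfterOperations.1 pvWitness_maxScoreAfterOperations.2.1 pvWitness_maxScoreAfterOperations.2.2 := by
  constructor <;> decide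


-- ---- depth is bounded by n ----

theorem pvc_chain (c : PvC) {v : Int} {d : Nat} (h : c.dp v = some d) :
    ∀ k, k ≤ d → c.dp ((c.pOf)^[k] v) = some (d - k) := by
  intro k
  induction k with
  | zero => intro _; simpa using h
  | succ k ih =>
    intro hk
    have hk' : k ≤ d := by omega
    have hck := ih hk'
    have hdk : d - k = (d - (k + 1)) + 1 := by omega
    rw [hdk] at hck
    rw [Function.iterate_succ_apply']
    exact (pvc_parent c hck).1

theorem pvc_depth_lt (c : PvC) {v : Int} {d : Nat} (h : c.dp v = some d) :
    (d : Int) < c.n := by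
  classical
  have hnd : ((List.range (d + 1)).map (fun k => (c.pOf)^[k] v)).Nodup := by
    refine List.Nodup.map_on ?_ List.nodup_range
    intro k hk j hj he
    have hk' : k ≤ d := Nat.lt_succ_iff.mp (List.mem_range.mp hk)
    have hj' : j ≤ d := Nat.lt_succ_iff.mp (List.mem_range.mp hj)
    have e1 := pvc_chain c h k hk'
    have e2 := pvc_chain c h j hj'
    rw [he, e2] at e1
    have : d - j = d - k := by
      injection e1
    omega
  have hsub : ((List.range (d + 1)).map (fun k => (c.pOf)^[k] v)).toFinset ⊆ Finset.Ico (0 : Int) c.n := by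
    intro x hx
    rcases List.mem_map.mp (List.mem_toFinset.mp hx) with ⟨k, hk, hxk⟩
    have hk' : k ≤ d := Nat.lt_succ_iff.mp (List.mem_range.mp hk)
    have hb := pvc_bounds c (pvc_chain c h k hk')
    rw [hxk] at hb
    exact Finset.mem_Ico.mpr ⟨hb.1, hb.2.1⟩
  have hcard : d + 1 ≤ (Finset.Ico (0 : Int) c.n).card := by
    calc d + 1 = ((List.range (d + 1)).map (fun k => (c.pOf)^[k] v)).length := by simp
    _ = ((List.range (d + 1)).map (fun k => (c.pOf)^[k] v)).toFinset.card :=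
        (List.toFinset_card_of_nodup hnd).symm
    _ ≤ _ := Finset.card_le_card hsub
  rw [Int.card_Ico] at hcard
  have hb := pvc_bounds c h
  omega

-- ---- adjacency rows coincide with the edge-derived neighbour multisets ----

theorem pvApp_length (t : List (List Int)) (u v : Int) : (pvApp t u v).length = t.length := by
  simp only [pvApp]; split_ifs <;> simp

-- row read through one guarded write at an arbitrary (already wrapped) index i
theorem pvRow_setg (t : List (List Int)) (i b v : Int) :
    pvRow (if 0 ≤ i ∧ i.toNat < t.length then t.set i.toNat ((t.getD i.toNat []) ++ [b]) else t) v =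
      if 0 ≤ i ∧ i.toNat < t.length ∧ v = i then pvRow t v ++ [b] else pvRow t v := by
  have hneg : ¬ 0 ≤ v → ∀ t' : List (List Int), pvRow t' v = [] := by
    intro hv t'; simp [pvRow, hv]
  by_cases hv : 0 ≤ v
  · by_cases hg : 0 ≤ i ∧ i.toNat < t.length
    · rw [if_pos hg]
      have h1 : pvRow (t.set i.toNat (t.getD i.toNat [] ++ [b])) v
          = (t.set i.toNat (t.getD i.toNat [] ++ [b])).getD v.toNat [] := by
        simp [pvRow, hv]
      rw [h1, pv_getD_setL]
      by_cases hvi : v = i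
      · subst hvi
        rw [if_pos ⟨rfl, hg.2⟩, if_pos ⟨hg.1, hg.2, rfl⟩]
        simp [pvRow, hv]
      · rw [if_neg (by intro hc; exact hvi (by omega)),
            if_neg (by intro hc; exact hvi hc.2.2)]
        simp [pvRow, hv]
    · rw [if_neg hg, if_neg (by intro hc; exact hg ⟨hc.1, hc.2.1⟩)]
  · rw [hneg hv _, if_neg (by intro hc; exact hv (hc.2.2 ▸ hc.1)), hneg hv t]

theorem pvRow_pvApp (t : List (List Int)) (a b v : Int) :
    pvRow (pvApp t a b) v =
      if 0 ≤ pvWrapI t.length a ∧ (pvWrapI t.length a).toNat < t.length ∧ v = pvWrapI t.length a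
      then pvRow t v ++ [b] else pvRow t v := by
  unfold pvApp
  exact pvRow_setg t (pvWrapI t.length a) b v

theorem pvNbrE_cons (e : List Int) (t : List (List Int)) (v : Int) :
    pvNbrE (e :: t) v =
      (match e with
       | [a, b] => (if a = v then [b] else []) ++ (if b = v then [a] else [])
       | _ => []) ++ pvNbrE t v := by
  simp [pvNbrE]

theorem pv_build_go (n : Int) (K : List Int) (hn : 0 ≤ n) (hK : ∀ k ∈ K, 0 ≤ k) :
    ∀ (edges : List (List Int)),
      (∀ e ∈ edges, pvEdgeOK n e = true) → (∀ e ∈ edges, pvWrapOK n K e = true) →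
    ∀ (t : List (List Int)), t.length = n.toNat → ∀ v, v ∈ K →
      pvRow (edges.foldl (fun t e => match e with | [u, w] => pvApp (pvApp t u w) w u | _ => t) t) v
        = pvRow t v ++ pvNbrE edges v := by
  intro edges
  induction edges with
  | nil => intro _ _ t _ v _; simp [pvNbrE]
  | cons e es ih =>
    intro hvalid hwrap t ht v hvK
    have he := hvalid e (by simp)
    have hw := hwrap e (by simp)
    match e with
    | [] => simp [pvEdgeOK] at he
    | [a] => simp [pvEdgeOK] at he
    | a :: b :: x :: r => simp [pvEdgeOK] at he
    | [a, b] =>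
      simp only [pvEdgeOK, decide_eq_true_eq] at he
      obtain ⟨han', han, hbn', hbn⟩ := he
      have hstep : (List.foldl (fun t e => match e with | [u, w] => pvApp (pvApp t u w) w u | _ => t) t ([a,b] :: es))
          = List.foldl (fun t e => match e with | [u, w] => pvApp (pvApp t u w) w u | _ => t) (pvApp (pvApp t a b) b a) es := by
        simp
      rw [hstep]
      have hlen : (pvApp (pvApp t a b) b a).length = n.toNat := by
        rw [pvApp_length, pvApp_length, ht]
      rw [ih (fun e he => hvalid e (by simp [he])) (fun e he => hwrap e (by simp [he])) _ hlen v hvK]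
      rw [pvNbrE_cons]
      have hlen1 : (pvApp t a b).length = t.length := pvApp_length t a b
      have hv0 : 0 ≤ v := hK v hvK
      have hrow : pvRow (pvApp (pvApp t a b) b a) v
          = pvRow t v ++ ((if a = v then [b] else []) ++ (if b = v then [a] else [])) := by
        by_cases hpos : 0 ≤ a ∧ 0 ≤ b
        · -- both endpoints non-negative: no wrapping, the original argument
          have hwa : pvWrapI t.length a = a := by simp [pvWrapI]; omega
          have hwb : pvWrapI (pvApp t a b).length b = b := by
            rw [hlen1]; simp [pvWrapI]; omega
          have haL : a.toNat < t.length := by omega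
          have hbL : b.toNat < (pvApp t a b).length := by rw [hlen1]; omega
          rw [pvRow_pvApp, pvRow_pvApp, hwa, hwb]
          have hca : (0 ≤ a ∧ a.toNat < t.length ∧ v = a) = (v = a) :=
            propext ⟨fun h => h.2.2, fun h => ⟨hpos.1, haL, h⟩⟩
          have hcb : (0 ≤ b ∧ b.toNat < (pvApp t a b).length ∧ v = b) = (v = b) :=
            propext ⟨fun h => h.2.2, fun h => ⟨hpos.2, hbL, h⟩⟩
          simp only [hca, hcb]
          by_cases hva : v = a <;> by_cases hvb : v = b <;>
              simp [hva, hvb, eq_comm, List.append_assoc] <;>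
            (try (split_ifs <;> simp [List.append_assoc]))
        · -- an endpoint is negative: both wrapped endpoints avoid K, so row v is untouched
          have hw2 : pvWrapI n.toNat a ∉ K ∧ pvWrapI n.toNat b ∉ K := by
            simp only [pvWrapOK, if_neg hpos, decide_eq_true_eq] at hw
            exact hw
          have hane : v ≠ a := by
            intro hva
            apply hw2.1
            have : pvWrapI n.toNat a = a := by simp [pvWrapI]; omega
            rw [this, ← hva]; exact hvK
          have hbne : v ≠ b := by
            intro hvb
            apply hw2.2
            have : pvWrapI n.toNat b = b := by simp [pvWrapI]; omega
            rw [this, ← hvb]; exact hvK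
          have hwa : v ≠ pvWrapI t.length a := by
            rw [ht]; intro hva; exact hw2.1 (by rw [← hva]; exact hvK)
          have hwb : v ≠ pvWrapI (pvApp t a b).length b := by
            rw [hlen1, ht]; intro hvb; exact hw2.2 (by rw [← hvb]; exact hvK)
          rw [pvRow_pvApp, pvRow_pvApp,
              if_neg (by intro hc; exact hwb hc.2.2),
              if_neg (by intro hc; exact hwa hc.2.2),
              if_neg (fun h => hane h.symm), if_neg (fun h => hbne h.symm)]
          simp
      rw [hrow]
      simp [List.append_assoc]

theorem pvc_row (c : PvC) {v : Int} {d : Nat} (h : c.dp v = some d) :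
    pvRow (pvAdj c.n c.edges) v = c.nb v := by
  have hn : (0 : Int) ≤ c.n :=
    le_of_lt (lt_of_le_of_lt (pvc_bounds c (pvc_root c)).1 (pvc_bounds c (pvc_root c)).2.1)
  have hK : ∀ k ∈ (pvDepList c.edges).map Prod.fst, 0 ≤ k := by
    intro k hk
    rcases List.mem_map.mp hk with ⟨p, hp, hpk⟩
    exact hpk ▸ (c.hnode p hp).1
  have hvK : v ∈ (pvDepList c.edges).map Prod.fst :=
    List.mem_map.mpr ⟨(v, d), pv_look_mem h, rfl⟩
  unfold pvAdj
  rw [pv_build_go c.n _ hn hK c.edges c.hvalid c.hwrap (List.replicate c.n.toNat []) (by simp) v hvK]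
  have : pvRow (List.replicate c.n.toNat ([] : List Int)) v = [] := by
    unfold pvRow
    split_ifs with hv
    · rw [List.getD_eq_getElem?_getD, List.getElem?_replicate]
      split_ifs <;> rfl
    · rfl
  rw [this]
  rfl


-- ---- children lists and DFS subtrees ----

def PvC.ch (c : PvC) (v : Int) : List Int := (c.nb v).filter (fun u => u ≠ c.pOf v)

theorem pvc_ch_mem (c : PvC) {v u : Int} : u ∈ c.ch v ↔ u ∈ c.nb v ∧ u ≠ c.pOf v := by
  unfold PvC.ch
  simp [List.mem_filter]

theorem pvc_ch_child (c : PvC) {v : Int} {d : Nat} (h : c.dp v = some d) {u : Int}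
    (hu : u ∈ c.ch v) : c.dp u = some (d + 1) ∧ c.pOf u = v := by
  have := (pvc_ch_mem c).mp hu
  exact pvc_child c h this.1 this.2

theorem pvc_ch_nodup (c : PvC) {v : Int} {d : Nat} (h : c.dp v = some d) : (c.ch v).Nodup := by
  apply List.nodup_iff_count_le_one.mpr
  intro u
  by_cases hu : u ∈ c.ch v
  · have hc := pvc_ch_child c h hu
    have h1 : (c.ch v).count u ≤ (c.nb v).count u := by
      unfold PvC.ch
      generalize c.nb v = l
      induction l with
      | nil => simp
      | cons a t ihl =>
        rw [List.filter_cons]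
        by_cases hp : a ≠ c.pOf v
        · rw [if_pos (by simpa using hp), List.count_cons, List.count_cons]
          omega
        · rw [if_neg (by simpa using hp), List.count_cons]
          omega
    have h2 : (c.nb v).count u = (c.nb u).count v := pv_nbrE_count c.edges u v
    have h3 : (c.nb u).count v = 1 := by
      have := pvc_count_parent c hc.1
      rw [hc.2] at this
      exact this
    omega
  · simp [List.count_eq_zero_of_not_mem hu]

def pvSub (c : PvC) : Nat → Int → List Int
  | 0, v => [v]
  | f+1, v => v :: (c.ch v).reverse.flatMap (pvSub c f)

def pvSubC (c : PvC) (v : Int) : List Int := pvSub c c.n.toNat v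

theorem pvSub_succ (c : PvC) (f : Nat) (v : Int) :
    pvSub c (f+1) v = v :: (c.ch v).reverse.flatMap (pvSub c f) := rfl

theorem pvc_pos (c : PvC) {v : Int} {d : Nat} (h : c.dp v = some d) : 0 < c.n :=
  lt_of_le_of_lt (pvc_bounds c h).1 (pvc_bounds c h).2.1

set_option maxRecDepth 4096 in
theorem pvSub_stable (c : PvC) : ∀ (m : Nat) {v : Int} {d : Nat}, c.dp v = some d →
    ∀ f g, c.n.toNat ≤ d + f → c.n.toNat ≤ d + g → c.n.toNat - d ≤ m →
    pvSub c f v = pvSub c g v := by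
  intro m
  induction m with
  | zero =>
    intro v d h f g _ _ hm
    have hd := pvc_depth_lt c h
    have hp := pvc_pos c h
    omega
  | succ m ih =>
    intro v d h f g hf hg hm
    have hd := pvc_depth_lt c h
    have hp := pvc_pos c h
    rcases f with _ | f'
    · omega
    rcases g with _ | g'
    · omega
    rw [pvSub_succ, pvSub_succ]
    refine congrArg (List.cons v) ?_
    apply List.flatMap_congr
    intro u hu
    have hu' : u ∈ c.ch v := List.mem_reverse.mp hu
    have hc := pvc_ch_child c h hu'
    exact ih hc.1 f' g' (by omega) (by omega) (by omega)

set_option maxRecDepth 4096 in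
theorem pvSubC_eq (c : PvC) {v : Int} {d : Nat} (h : c.dp v = some d) :
    pvSubC c v = v :: (c.ch v).reverse.flatMap (pvSubC c) := by
  have hd := pvc_depth_lt c h
  have hp := pvc_pos c h
  unfold pvSubC
  have hn : c.n.toNat = (c.n.toNat - 1) + 1 := by omega
  rw [hn, pvSub_succ]
  refine congrArg (List.cons v) ?_
  apply List.flatMap_congr
  intro u hu
  have hc := pvc_ch_child c h (List.mem_reverse.mp hu)
  exact pvSub_stable c c.n.toNat hc.1 _ _ (by omega) (by omega) (by omega)

theorem pvSub_mem (c : PvC) : ∀ (f : Nat) {v : Int} {d : Nat}, c.dp v = some d →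
    ∀ w ∈ pvSub c f v, ∃ k, c.dp w = some (d + k) ∧ (c.pOf)^[k] w = v := by
  intro f
  induction f with
  | zero =>
    intro v d h w hw
    have : w = v := by simpa [pvSub] using hw
    exact ⟨0, by simpa [this] using h, by simp [this]⟩
  | succ f ih =>
    intro v d h w hw
    rcases List.mem_cons.mp hw with hw | hw
    · exact ⟨0, by simpa [hw] using h, by simp [hw]⟩
    · rcases List.mem_flatMap.mp hw with ⟨u, hu, hwu⟩
      have hc := pvc_ch_child c h (List.mem_reverse.mp hu)
      rcases ih hc.1 w hwu with ⟨k, hk1, hk2⟩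
      have hadd : d + 1 + k = d + (k + 1) := by omega
      refine ⟨k + 1, by rw [hk1, hadd], ?_⟩
      rw [Function.iterate_succ_apply', hk2, hc.2]

theorem pvSubC_mem (c : PvC) {v : Int} {d : Nat} (h : c.dp v = some d) :
    ∀ w ∈ pvSubC c v, ∃ k, c.dp w = some (d + k) ∧ (c.pOf)^[k] w = v :=
  pvSub_mem c c.n.toNat h

theorem pvSubC_self (c : PvC) {v : Int} {d : Nat} (h : c.dp v = some d) : v ∈ pvSubC c v := by
  rw [pvSubC_eq c h]; simp

theorem pvSubC_nodup (c : PvC) : ∀ (m : Nat) {v : Int} {d : Nat}, c.dp v = some d →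
    c.n.toNat - d ≤ m → (pvSubC c v).Nodup := by
  intro m
  induction m with
  | zero =>
    intro v d h hm
    have hd := pvc_depth_lt c h
    have hp := pvc_pos c h
    omega
  | succ m ih =>
    intro v d h hm
    rw [pvSubC_eq c h]
    have hd := pvc_depth_lt c h
    refine List.nodup_cons.mpr ⟨?_, ?_⟩
    · intro hv
      rcases List.mem_flatMap.mp hv with ⟨u, hu, hvu⟩
      have hc := pvc_ch_child c h (List.mem_reverse.mp hu)
      rcases pvSubC_mem c hc.1 v hvu with ⟨k, hk1, _⟩
      rw [h] at hk1
      have : d = d + 1 + k := by injection hk1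
      omega
    · apply pv_nodup_flatMap
      · exact List.nodup_reverse.mpr (pvc_ch_nodup c h)
      · intro u hu
        exact ih (pvc_ch_child c h (List.mem_reverse.mp hu)).1 (by omega)
      · have hnd : (c.ch v).reverse.Pairwise (· ≠ ·) := List.nodup_reverse.mpr (pvc_ch_nodup c h)
        apply List.Pairwise.imp_of_mem ?_ hnd
        intro u1 u2 h1 h2 hne w hw1 hw2
        have hc1 := pvc_ch_child c h (List.mem_reverse.mp h1)
        have hc2 := pvc_ch_child c h (List.mem_reverse.mp h2)
        rcases pvSubC_mem c hc1.1 w hw1 with ⟨k1, hk1, he1⟩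
        rcases pvSubC_mem c hc2.1 w hw2 with ⟨k2, hk2, he2⟩
        have hkk : k1 = k2 := by
          rw [hk1] at hk2
          have : d + 1 + k1 = d + 1 + k2 := by injection hk2
          omega
        subst hkk
        rw [he1] at he2
        exact hne (he2 ▸ rfl)

theorem pv_len_le (l : List Int) (hnd : l.Nodup) (N : Int)
    (h : ∀ x ∈ l, 0 ≤ x ∧ x < N) : l.length ≤ N.toNat := by
  classical
  calc l.length = l.toFinset.card := (List.toFinset_card_of_nodup hnd).symm
  _ ≤ (Finset.Ico (0 : Int) N).card := by
      apply Finset.card_le_card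
      intro x hx
      have := h x (List.mem_toFinset.mp hx)
      exact Finset.mem_Ico.mpr this
  _ = N.toNat := by rw [Int.card_Ico]; omega

theorem pvSubC_len (c : PvC) {v : Int} {d : Nat} (h : c.dp v = some d) :
    (pvSubC c v).length ≤ c.n.toNat := by
  apply pv_len_le _ (pvSubC_nodup c c.n.toNat h (by omega)) c.n
  intro x hx
  rcases pvSubC_mem c h x hx with ⟨k, hk, _⟩
  have := pvc_bounds c hk
  exact ⟨this.1, this.2.1⟩


-- ---- the canonical per-node DP values, via A's recursion ----

theorem pvDfsA_succ (tree : List (List Int)) (values : List Int) (f : Nat) (node parent : Int) :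
    pvDfsA tree values (f+1) node parent =
      (pvRow tree node).foldl
        (fun cn child =>
          if child = parent then cn
          else
            let r := pvDfsA tree values f child node
            (cn.1 + r.2, cn.2 + max r.1 r.2))
        (pvVal values node, 0) := rfl

theorem pv_dfs_fold (tree : List (List Int)) (values : List Int) (f : Nat) (node parent : Int) :
    ∀ (l : List Int) (a b : Int),
      l.foldl (fun cn child =>
          if child = parent then cn
          else
            let r := pvDfsA tree values f child node
            (cn.1 + r.2, cn.2 + max r.1 r.2)) (a, b)
      = (a + ((l.filter (fun x => x ≠ parent)).map (fun u => (pvDfsA tree values f u node).2)).sum,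
         b + ((l.filter (fun x => x ≠ parent)).map
              (fun u => max (pvDfsA tree values f u node).1 (pvDfsA tree values f u node).2)).sum) := by
  intro l
  induction l with
  | nil => intro a b; simp
  | cons x t ihl =>
    intro a b
    rw [List.foldl_cons, List.filter_cons]
    by_cases hx : x = parent
    · rw [if_pos hx, if_neg (by simp [hx]), ihl]
    · rw [if_neg hx, if_pos (by simp [hx])]
      rw [show (let r := pvDfsA tree values f x node
            ((a, b).1 + r.2, (a, b).2 + max r.1 r.2))
          = (a + (pvDfsA tree values f x node).2,
             b + max (pvDfsA tree values f x node).1 (pvDfsA tree values f x node).2) from rfl]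
      rw [ihl]
      simp only [List.map_cons, List.sum_cons]
      rw [Prod.mk.injEq]
      constructor <;> ring

def pvDfsC (c : PvC) (v : Int) : Int × Int := pvDfsA (pvAdj c.n c.edges) c.values c.n.toNat v (c.pOf v)

theorem pv_dfs_eq (c : PvC) : ∀ (m : Nat) {v : Int} {d : Nat}, c.dp v = some d →
    c.n.toNat - d ≤ m → ∀ f, c.n.toNat ≤ d + f + 1 →
    pvDfsA (pvAdj c.n c.edges) c.values (f+1) v (c.pOf v) =
      (pvVal c.values v + ((c.ch v).map (fun u => (pvDfsC c u).2)).sum,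
       ((c.ch v).map (fun u => max (pvDfsC c u).1 (pvDfsC c u).2)).sum) := by
  intro m
  induction m with
  | zero =>
    intro v d h hm f hf
    have hd := pvc_depth_lt c h
    have hp := pvc_pos c h
    omega
  | succ m ih =>
    intro v d h hm f hf
    have hd := pvc_depth_lt c h
    have hp := pvc_pos c h
    rw [pvDfsA_succ, pvc_row c h, pv_dfs_fold]
    have hch : (c.nb v).filter (fun x => x ≠ c.pOf v) = c.ch v := rfl
    rw [hch]
    have hmap : ∀ (u : Int), u ∈ c.ch v →
        pvDfsA (pvAdj c.n c.edges) c.values f u v = pvDfsC c u := by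
      intro u hu
      have hc := pvc_ch_child c h hu
      have hdu := pvc_depth_lt c hc.1
      rcases f with _ | f'
      · exfalso; omega
      · rw [← hc.2]
        rw [ih hc.1 (by omega) f' (by omega)]
        unfold pvDfsC
        have hn1 : c.n.toNat = (c.n.toNat - 1) + 1 := by omega
        rw [hn1, ih hc.1 (by omega) (c.n.toNat - 1) (by omega)]
        rw [← hn1]
        rfl
    have hm1 : (c.ch v).map (fun u => (pvDfsA (pvAdj c.n c.edges) c.values f u v).2)
        = (c.ch v).map (fun u => (pvDfsC c u).2) :=
      List.map_congr_left (fun u hu => congrArg Prod.snd (hmap u hu))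
    have hm2 : (c.ch v).map (fun u => max (pvDfsA (pvAdj c.n c.edges) c.values f u v).1
          (pvDfsA (pvAdj c.n c.edges) c.values f u v).2)
        = (c.ch v).map (fun u => max (pvDfsC c u).1 (pvDfsC c u).2) :=
      List.map_congr_left (fun u hu => by rw [hmap u hu])
    rw [hm1, hm2, zero_add]

theorem pvA_result (c : PvC) :
    maxScoreAfterOperations c.n c.edges c.values = max (pvDfsC c 0).1 (pvDfsC c 0).2 := by
  have h0 := pvc_root c
  have hp := pvc_pos c h0
  have hroot : c.pOf 0 = -1 := pvc_pOf_root c h0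
  unfold maxScoreAfterOperations
  have h1 : pvDfsA (pvAdj c.n c.edges) c.values (c.n.toNat + 1) 0 (-1)
      = pvDfsC c 0 := by
    rw [← hroot]
    rw [pv_dfs_eq c c.n.toNat h0 (by omega) c.n.toNat (by omega)]
    unfold pvDfsC
    have hn1 : c.n.toNat = (c.n.toNat - 1) + 1 := by omega
    rw [hn1, pv_dfs_eq c c.n.toNat h0 (by omega) (c.n.toNat - 1) (by omega)]
    rw [← hn1]
    rfl
  simp only [h1]


-- ---- array reads and writes ----

theorem pvSetAt_length (l : List Int) (i x : Int) : (pvSetAt l i x).length = l.length := by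
  unfold pvSetAt; split_ifs <;> simp

theorem pvVal_pvSetAt (l : List Int) (i x u : Int) :
    pvVal (pvSetAt l i x) u = if 0 ≤ i ∧ i.toNat < l.length ∧ u = i then x else pvVal l u := by
  have hneg : ¬ 0 ≤ u → pvVal (pvSetAt l i x) u = 0 ∧ pvVal l u = 0 := by
    intro hu; constructor <;> simp [pvVal, hu]
  by_cases hu : 0 ≤ u
  · by_cases hg : 0 ≤ i ∧ i.toNat < l.length
    · have h1 : pvVal (pvSetAt l i x) u = (l.set i.toNat x).getD u.toNat 0 := by
        simp [pvSetAt, pvVal, hg, hu]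
      rw [h1, pv_getD_set]
      by_cases hui : u = i
      · subst hui
        rw [if_pos ⟨rfl, hg.2⟩, if_pos ⟨hg.1, hg.2, rfl⟩]
      · rw [if_neg (by intro hc; exact hui (by omega)),
            if_neg (by intro hc; exact hui hc.2.2)]
        simp [pvVal, hu]
    · have heq : pvSetAt l i x = l := by simp [pvSetAt, hg]
      rw [heq, if_neg (by intro hc; exact hg ⟨hc.1, hc.2.1⟩)]
  · rw [if_neg (by intro hc; exact hu (hc.2.2 ▸ hc.1)), (hneg hu).1, (hneg hu).2]

theorem pvVal_replicate (m : Nat) (x u : Int) :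
    pvVal (List.replicate m x) u = if 0 ≤ u ∧ u.toNat < m then x else 0 := by
  unfold pvVal
  by_cases hu : 0 ≤ u
  · rw [if_pos hu, List.getD_eq_getElem?_getD, List.getElem?_replicate]
    by_cases hm : u.toNat < m
    · rw [if_pos hm, if_pos ⟨hu, hm⟩]; rfl
    · rw [if_neg hm, if_neg (by intro hc; exact hm hc.2)]; rfl
  · rw [if_neg hu, if_neg (by intro hc; exact hu hc.1)]

-- ---- phase 1: the stack loop produces the DFS order and the parent table ----

theorem pv_stack_fold (p v : Int) : ∀ (l : List Int) (rest : List (Int × Int)),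
    l.foldl (fun s nb => if nb = p then s else (nb, v) :: s) rest
      = ((l.filter (fun x => x ≠ p)).reverse.map (fun u => (u, v))) ++ rest := by
  intro l
  induction l with
  | nil => intro rest; simp
  | cons x t ihl =>
    intro rest
    rw [List.foldl_cons, List.filter_cons]
    by_cases hx : x = p
    · rw [if_pos hx, if_neg (by simp [hx]), ihl]
    · rw [if_neg hx, if_pos (by simp [hx]), ihl]
      simp

theorem pvVisit_nil (adj : List (List Int)) (f : Nat) (order par : List Int) :
    pvVisit adj (f+1) [] order par = (order, par) := rfl

theorem pvVisit_step (adj : List (List Int)) (f : Nat) (node p : Int)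
    (rest : List (Int × Int)) (order par : List Int) :
    pvVisit adj (f+1) ((node, p) :: rest) order par =
      pvVisit adj f
        ((pvRow adj node).foldl (fun s nb => if nb = p then s else (nb, node) :: s) rest)
        (order ++ [node]) (pvSetAt par node p) := rfl

theorem pv_visit_run (c : PvC) : ∀ (m : Nat) {v : Int} {d : Nat}, c.dp v = some d →
    c.n.toNat - d ≤ m →
    ∀ (g : Nat) (rest : List (Int × Int)) (order par : List Int),
    pvVisit (pvAdj c.n c.edges) (g + (pvSubC c v).length) ((v, c.pOf v) :: rest) order par
      = pvVisit (pvAdj c.n c.edges) g rest (order ++ pvSubC c v)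
          ((pvSubC c v).foldl (fun pa u => pvSetAt pa u (c.pOf u)) par) := by
  intro m
  induction m with
  | zero =>
    intro v d h hm g rest order par
    have hd := pvc_depth_lt c h
    have hp := pvc_pos c h
    omega
  | succ m ih =>
    intro v d h hm g rest order par
    have hd := pvc_depth_lt c h
    have hsub := pvSubC_eq c h
    have key : ∀ (cs : List Int), (∀ u ∈ cs, c.dp u = some (d+1) ∧ c.pOf u = v) →
        ∀ (g' : Nat) (rest' : List (Int × Int)) (order' par' : List Int),
        pvVisit (pvAdj c.n c.edges) (g' + (cs.flatMap (pvSubC c)).length)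
            (cs.map (fun u => (u, v)) ++ rest') order' par'
          = pvVisit (pvAdj c.n c.edges) g' rest' (order' ++ cs.flatMap (pvSubC c))
              ((cs.flatMap (pvSubC c)).foldl (fun pa u => pvSetAt pa u (c.pOf u)) par') := by
      intro cs
      induction cs with
      | nil => intro _ g' rest' order' par'; simp
      | cons u cs' ihc =>
        intro hcs g' rest' order' par'
        have hu := hcs u (by simp)
        have harith : g' + ((u :: cs').flatMap (pvSubC c)).length
            = (g' + (cs'.flatMap (pvSubC c)).length) + (pvSubC c u).length := by
          simp [List.flatMap_cons]
          omega
        rw [harith]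
        have hframe : ((u :: cs').map (fun u => (u, v)) ++ rest')
            = (u, c.pOf u) :: (cs'.map (fun u => (u, v)) ++ rest') := by
          simp [hu.2]
        rw [hframe]
        rw [ih hu.1 (by omega) _ _ order' par']
        rw [ihc (fun w hw => hcs w (by simp [hw])) g' rest' (order' ++ pvSubC c u)
            ((pvSubC c u).foldl (fun pa w => pvSetAt pa w (c.pOf w)) par')]
        rw [List.flatMap_cons, List.foldl_append, List.append_assoc]
    have harith2 : g + (pvSubC c v).length
        = ((g + ((c.ch v).reverse.flatMap (pvSubC c)).length)) + 1 := by
      rw [hsub]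
      simp
      omega
    rw [harith2, pvVisit_step, pvc_row c h, pv_stack_fold]
    have hch2 : (c.nb v).filter (fun x => x ≠ c.pOf v) = c.ch v := rfl
    rw [hch2]
    rw [key ((c.ch v).reverse)
        (fun u hu => pvc_ch_child c h (List.mem_reverse.mp hu)) g rest
        (order ++ [v]) (pvSetAt par v (c.pOf v))]
    rw [hsub]
    simp only [List.foldl_cons, List.append_assoc, List.singleton_append]

theorem pv_phase1 (c : PvC) :
    pvVisit (pvAdj c.n c.edges) (c.n.toNat + 2) [(0, -1)] [] (List.replicate c.n.toNat (-1))
      = (pvSubC c 0,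
         (pvSubC c 0).foldl (fun pa u => pvSetAt pa u (c.pOf u)) (List.replicate c.n.toNat (-1))) := by
  have h0 := pvc_root c
  have hlen := pvSubC_len c h0
  have hroot : c.pOf 0 = -1 := pvc_pOf_root c h0
  have harith : c.n.toNat + 2 = (c.n.toNat + 2 - (pvSubC c 0).length) + (pvSubC c 0).length := by
    omega
  rw [harith, show ((0 : Int), (-1 : Int)) = (0, c.pOf 0) from by rw [hroot]]
  rw [pv_visit_run c c.n.toNat h0 (by omega) _ _ _ _]
  have hg : c.n.toNat + 2 - (pvSubC c 0).length = (c.n.toNat + 1 - (pvSubC c 0).length) + 1 := by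
    omega
  rw [hg, pvVisit_nil]
  simp

-- ---- reading the parent table ----

theorem pv_parfold_read (c : PvC) : ∀ (l : List Int) (par : List Int) (u : Int),
    par.length = c.n.toNat → (∀ w ∈ l, ∃ dw, c.dp w = some dw) →
    pvVal (l.foldl (fun pa w => pvSetAt pa w (c.pOf w)) par) u
      = if u ∈ l then c.pOf u else pvVal par u := by
  intro l
  induction l with
  | nil => intro par u _ _; simp
  | cons w t ihl =>
    intro par u hpar hlab
    rw [List.foldl_cons]
    rw [ihl (pvSetAt par w (c.pOf w)) u (by rw [pvSetAt_length]; exact hpar)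
        (fun x hx => hlab x (by simp [hx]))]
    rcases hlab w (by simp) with ⟨dw, hdw⟩
    have hb := pvc_bounds c hdw
    by_cases hut : u ∈ t
    · rw [if_pos hut, if_pos (by simp [hut])]
    · rw [if_neg hut, pvVal_pvSetAt]
      by_cases huw : u = w
      · subst huw
        rw [if_pos ⟨hb.1, by omega, rfl⟩, if_pos (by simp)]
      · rw [if_neg (by intro hc; exact huw hc.2.2), if_neg (by simp [huw, hut])]


-- ---- subtree membership facts needed by the backward fold ----

theorem pv_not_mem_sub (c : PvC) {w u : Int} {dw du : Nat} (hw : c.dp w = some dw)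
    (hu : c.dp u = some du) (hlt : dw < du) : w ∉ pvSubC c u := by
  intro hmem
  rcases pvSubC_mem c hu w hmem with ⟨k, hk, _⟩
  rw [hw] at hk
  have : dw = du + k := by injection hk
  omega

theorem pv_sub_disjoint (c : PvC) {u1 u2 : Int} {d1 : Nat} (h1 : c.dp u1 = some d1)
    (h2 : c.dp u2 = some d1) (hne : u1 ≠ u2) {w : Int} (hw1 : w ∈ pvSubC c u1) :
    w ∉ pvSubC c u2 := by
  intro hw2
  rcases pvSubC_mem c h1 w hw1 with ⟨k1, hk1, he1⟩
  rcases pvSubC_mem c h2 w hw2 with ⟨k2, hk2, he2⟩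
  have hkk : k1 = k2 := by
    rw [hk1] at hk2
    have : d1 + k1 = d1 + k2 := by injection hk2
    omega
  subst hkk
  rw [he1] at he2
  exact hne he2

theorem pv_mem_ch_parent (c : PvC) {w : Int} {dw : Nat} (hw : c.dp w = some (dw + 1)) :
    w ∈ c.ch (c.pOf w) := by
  have hpar := pvc_parent c hw
  apply (pvc_ch_mem c).mpr
  refine ⟨pvc_nb_symm c hpar.2, ?_⟩
  intro heq
  rcases Nat.eq_zero_or_pos dw with hz | hpos
  · subst hz
    have := pvc_pOf_root c hpar.1
    have hb := pvc_bounds c hw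
    rw [heq, this] at hb
    omega
  · have hdw : dw = (dw - 1) + 1 := by omega
    have hpp := pvc_parent c (hdw ▸ hpar.1)
    rw [← heq] at hpp
    rw [hw] at hpp
    have : dw + 1 = dw - 1 := by
      have := hpp.1
      injection this
    omega

theorem pv_mem_sub_anc (c : PvC) : ∀ (k : Nat) {u : Int} {du : Nat}, c.dp u = some du →
    k ≤ du → u ∈ pvSubC c ((c.pOf)^[k] u) := by
  intro k
  induction k with
  | zero =>
    intro u du hu _
    exact pvSubC_self c hu
  | succ k ih =>
    intro u du hu hk
    have hw := pvc_chain c hu k (by omega)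
    have hdk : du - k = (du - (k + 1)) + 1 := by omega
    rw [hdk] at hw
    have hch := pv_mem_ch_parent c hw
    rw [Function.iterate_succ_apply']
    rw [pvSubC_eq c (pvc_parent c hw).1]
    apply List.mem_cons_of_mem
    apply List.mem_flatMap.mpr
    exact ⟨(c.pOf)^[k] u, List.mem_reverse.mpr hch, ih hu (by omega)⟩

theorem pv_mem_sub0 (c : PvC) {u : Int} {du : Nat} (hu : c.dp u = some du) :
    u ∈ pvSubC c 0 := by
  have h := pv_mem_sub_anc c du hu (le_refl du)
  have hz := pvc_chain c hu du (le_refl du)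
  have : du - du = 0 := by omega
  rw [this] at hz
  rwa [pvc_zero c hz] at h

-- ---- one step of the backward fold ----

theorem pvStep_skip (parent : List Int) (cn : List Int × List Int) (node : Int)
    (h : pvVal parent node = -1) : pvStep parent cn node = cn := by
  simp [pvStep, h]

theorem pvStep_go (parent : List Int) (cn : List Int × List Int) (node : Int)
    (h : ¬ pvVal parent node = -1) :
    pvStep parent cn node =
      (pvSetAt cn.1 (pvVal parent node)
         (pvVal cn.1 (pvVal parent node) + pvVal cn.2 node),
       pvSetAt cn.2 (pvVal parent node)
         (pvVal cn.2 (pvVal parent node) +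
           max (pvVal (pvSetAt cn.1 (pvVal parent node)
                  (pvVal cn.1 (pvVal parent node) + pvVal cn.2 node)) node)
               (pvVal cn.2 node))) := by
  simp [pvStep, h]


-- ---- the canonical DP values satisfy the one-node recurrence ----

theorem pvDfsC_eq (c : PvC) {v : Int} {d : Nat} (h : c.dp v = some d) :
    pvDfsC c v = (pvVal c.values v + ((c.ch v).map (fun u => (pvDfsC c u).2)).sum,
                  ((c.ch v).map (fun u => max (pvDfsC c u).1 (pvDfsC c u).2)).sum) := by
  unfold pvDfsC
  have hp := pvc_pos c h
  have hd := pvc_depth_lt c h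
  have hn1 : c.n.toNat = (c.n.toNat - 1) + 1 := by omega
  rw [hn1, pv_dfs_eq c c.n.toNat h (by omega) (c.n.toNat - 1) (by omega)]
  rw [← hn1]
  rfl

theorem pvc_label_ne (c : PvC) {x y : Int} {a b : Nat} (hx : c.dp x = some a)
    (hy : c.dp y = some b) (hab : a ≠ b) : x ≠ y := by
  intro he
  rw [he, hy] at hx
  have : b = a := by injection hx
  omega

-- what the backward fold guarantees, for node v's subtree, relative to start arrays (ch, nc)
def PvPost (c : PvC) (v : Int) (d : Nat) (ch nc : List Int) (r : List Int × List Int) : Prop :=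
  r.1.length = ch.length ∧ r.2.length = nc.length ∧
  (∀ u ∈ pvSubC c v, pvVal r.1 u = (pvDfsC c u).1 ∧ pvVal r.2 u = (pvDfsC c u).2) ∧
  (∀ w : Int, w ∉ pvSubC c v → w ≠ c.pOf v → pvVal r.1 w = pvVal ch w ∧ pvVal r.2 w = pvVal nc w) ∧
  (0 < d → pvVal r.1 (c.pOf v) = pvVal ch (c.pOf v) + (pvDfsC c v).2 ∧
           pvVal r.2 (c.pOf v) = pvVal nc (c.pOf v) + max (pvDfsC c v).1 (pvDfsC c v).2)

theorem pv_phase2 (c : PvC) (parF : List Int)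
    (hparF : ∀ (u : Int) (du : Nat), c.dp u = some du → pvVal parF u = c.pOf u) :
    ∀ (m : Nat) {v : Int} {d : Nat}, c.dp v = some d → c.n.toNat - d ≤ m →
    ∀ (ch nc : List Int), ch.length = c.values.length → nc.length = c.n.toNat →
    (∀ u ∈ pvSubC c v, pvVal ch u = pvVal c.values u ∧ pvVal nc u = 0) →
    PvPost c v d ch nc (((pvSubC c v).reverse).foldl (pvStep parF) (ch, nc)) := by
  intro m
  induction m with
  | zero =>
    intro v d h hm
    have hd := pvc_depth_lt c h
    have hp := pvc_pos c h
    omega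
  | succ m ih =>
    intro v d h hm ch nc hLch hLnc hinit
    have hd := pvc_depth_lt c h
    have hp := pvc_pos c h
    have hsub := pvSubC_eq c h
    -- the reversed subtree order: children blocks (in adjacency order), then v itself
    have hrev : (pvSubC c v).reverse
        = (c.ch v).flatMap (fun u => (pvSubC c u).reverse) ++ [v] := by
      rw [hsub, List.reverse_cons, pv_reverse_flatMap, List.reverse_reverse]
    -- membership transfer between the two flatMap orientations
    have hmemflat : ∀ w : Int, w ∈ (c.ch v).flatMap (pvSubC c)
        ↔ (∃ u ∈ c.ch v, w ∈ pvSubC c u) := by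
      intro w; simp [List.mem_flatMap]
    have hmemsub : ∀ w : Int, w ∈ pvSubC c v ↔ (w = v ∨ ∃ u ∈ c.ch v, w ∈ pvSubC c u) := by
      intro w
      rw [hsub]
      simp [List.mem_flatMap]
    -- the inner sweep over a set of children blocks
    have key : ∀ (cs : List Int), (∀ u ∈ cs, u ∈ c.ch v) → cs.Nodup →
        ∀ (ch' nc' : List Int), ch'.length = c.values.length → nc'.length = c.n.toNat →
        (∀ u ∈ cs.flatMap (pvSubC c), pvVal ch' u = pvVal c.values u ∧ pvVal nc' u = 0) →
        ((((cs.flatMap (fun u => (pvSubC c u).reverse)).foldl (pvStep parF) (ch', nc')).1.length = ch'.length) ∧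
         (((cs.flatMap (fun u => (pvSubC c u).reverse)).foldl (pvStep parF) (ch', nc')).2.length = nc'.length) ∧
         (∀ u ∈ cs.flatMap (pvSubC c),
           pvVal ((cs.flatMap (fun u => (pvSubC c u).reverse)).foldl (pvStep parF) (ch', nc')).1 u = (pvDfsC c u).1 ∧
           pvVal ((cs.flatMap (fun u => (pvSubC c u).reverse)).foldl (pvStep parF) (ch', nc')).2 u = (pvDfsC c u).2) ∧
         (∀ w : Int, w ∉ cs.flatMap (pvSubC c) → w ≠ v →
           pvVal ((cs.flatMap (fun u => (pvSubC c u).reverse)).foldl (pvStep parF) (ch', nc')).1 w = pvVal ch' w ∧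
           pvVal ((cs.flatMap (fun u => (pvSubC c u).reverse)).foldl (pvStep parF) (ch', nc')).2 w = pvVal nc' w) ∧
         (pvVal ((cs.flatMap (fun u => (pvSubC c u).reverse)).foldl (pvStep parF) (ch', nc')).1 v
            = pvVal ch' v + (cs.map (fun u => (pvDfsC c u).2)).sum ∧
          pvVal ((cs.flatMap (fun u => (pvSubC c u).reverse)).foldl (pvStep parF) (ch', nc')).2 v
            = pvVal nc' v + (cs.map (fun u => max (pvDfsC c u).1 (pvDfsC c u).2)).sum)) := by
      intro cs
      induction cs with
      | nil =>
        intro _ _ ch' nc' hL1 hL2 _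
        simp
      | cons u cs' ihc =>
        intro hcs hnd ch' nc' hL1 hL2 hun
        have hu := pvc_ch_child c h (hcs u (by simp))
        have hdu := pvc_depth_lt c hu.1
        -- fold u's block first, by the outer induction hypothesis
        have r1post := ih hu.1 (by omega) ch' nc' hL1 hL2
          (fun w hw => hun w (by simp [List.mem_flatMap]; exact Or.inl hw))
        set r1 := (((pvSubC c u).reverse).foldl (pvStep parF) (ch', nc')) with hr1
        obtain ⟨hr1L1, hr1L2, hr1fin, hr1un, hr1par⟩ := r1post
        rw [hu.2] at hr1par
        have hr1parv := hr1par (by omega)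
        -- siblings' subtrees are untouched by u's block
        have hdisj : ∀ w ∈ cs'.flatMap (pvSubC c), w ∉ pvSubC c u ∧ w ≠ v := by
          intro w hw
          rcases List.mem_flatMap.mp hw with ⟨u', hu', hwu'⟩
          have hu'c := pvc_ch_child c h (hcs u' (by simp [hu']))
          have hneu : u' ≠ u := by
            intro he
            rw [he] at hu'
            exact (List.nodup_cons.mp hnd).1 hu'
          constructor
          · exact pv_sub_disjoint c hu'c.1 hu.1 hneu hwu'
          · rcases pvSubC_mem c hu'c.1 w hwu' with ⟨k, hk, _⟩
            exact pvc_label_ne c hk h (by omega)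
        have ihcpost := ihc (fun w hw => hcs w (by simp [hw])) (List.nodup_cons.mp hnd).2 r1.1 r1.2
          (by rw [hr1L1, hL1]) (by rw [hr1L2, hL2])
          (by
            intro w hw
            have hd2 := hdisj w hw
            have := hr1un w hd2.1 (by rw [hu.2]; exact hd2.2)
            rw [this.1, this.2]
            exact hun w (by
              rcases List.mem_flatMap.mp hw with ⟨u', hu', hwu'⟩
              exact List.mem_flatMap.mpr ⟨u', by simp [hu'], hwu'⟩))
        have hfold : ((u :: cs').flatMap (fun x => (pvSubC c x).reverse)).foldl (pvStep parF) (ch', nc')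
            = (cs'.flatMap (fun x => (pvSubC c x).reverse)).foldl (pvStep parF) (r1.1, r1.2) := by
          rw [List.flatMap_cons, List.foldl_append, hr1]
        rw [hfold]
        obtain ⟨hfL1, hfL2, hffin, hfun, hfv⟩ := ihcpost
        have hvnotflat : (v : Int) ∉ cs'.flatMap (pvSubC c) := by
          intro hv
          exact absurd rfl (hdisj v hv).2
        have hvne : ∀ u' ∈ c.ch v, v ∉ pvSubC c u' := by
          intro u' hu'
          have hc' := pvc_ch_child c h hu'
          exact pv_not_mem_sub c h hc'.1 (by omega)
        refine ⟨by rw [hfL1, hr1L1], by rw [hfL2, hr1L2], ?_, ?_, ?_⟩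
        · -- final values on the whole block list
          intro w hw
          rcases List.mem_flatMap.mp hw with ⟨u', hu', hwu'⟩
          rcases List.mem_cons.mp hu' with he | hin
          · -- w lies in u's subtree: final after r1, untouched afterwards
            subst he
            have hfinal := hr1fin w hwu'
            have hnot : w ∉ cs'.flatMap (pvSubC c) := by
              intro hw2
              exact absurd hwu' ((hdisj w hw2).1)
            have hwnev : w ≠ v := by
              rcases pvSubC_mem c hu.1 w hwu' with ⟨k, hk, _⟩
              exact pvc_label_ne c hk h (by omega)
            have := hfun w hnot hwnev
            rw [this.1, this.2]
            exact hfinal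
          · exact hffin w (List.mem_flatMap.mpr ⟨u', hin, hwu'⟩)
        · -- untouched outside the blocks
          intro w hw hwv
          have hw1 : w ∉ pvSubC c u := by
            intro hwu
            exact hw (List.mem_flatMap.mpr ⟨u, by simp, hwu⟩)
          have hw2 : w ∉ cs'.flatMap (pvSubC c) := by
            intro hw2
            rcases List.mem_flatMap.mp hw2 with ⟨u', hu', hwu'⟩
            exact hw (List.mem_flatMap.mpr ⟨u', by simp [hu'], hwu'⟩)
          have ha := hfun w hw2 hwv
          have hb := hr1un w hw1 (by rw [hu.2]; exact hwv)
          rw [ha.1, ha.2, hb.1, hb.2]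
          exact ⟨rfl, rfl⟩
        · -- the accumulation at v
          constructor
          · rw [hfv.1, hr1parv.1, List.map_cons, List.sum_cons]
            ring
          · rw [hfv.2, hr1parv.2, List.map_cons, List.sum_cons]
            ring
    -- apply the sweep to all children, then do v's own step
    have hchnd := pvc_ch_nodup c h
    have keyall := key (c.ch v) (fun _ hu => hu) hchnd ch nc hLch hLnc
      (fun w hw => hinit w (by
        rcases List.mem_flatMap.mp hw with ⟨u', hu', hwu'⟩
        exact (hmemsub w).mpr (Or.inr ⟨u', hu', hwu'⟩)))
    set rs := ((c.ch v).flatMap (fun u => (pvSubC c u).reverse)).foldl (pvStep parF) (ch, nc) with hrs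
    obtain ⟨hsL1, hsL2, hsfin, hsun, hsv⟩ := keyall
    have hvin : v ∈ pvSubC c v := pvSubC_self c h
    have hinitv := hinit v hvin
    have hdfseq := pvDfsC_eq c h
    have hfoldall : ((pvSubC c v).reverse).foldl (pvStep parF) (ch, nc)
        = pvStep parF (rs.1, rs.2) v := by
      rw [hrev, List.foldl_append, hrs]
      rfl
    have hvnotflat2 : (v : Int) ∉ (c.ch v).flatMap (pvSubC c) := by
      intro hv
      rcases List.mem_flatMap.mp hv with ⟨u', hu', hwu'⟩
      have hc' := pvc_ch_child c h hu'
      exact pv_not_mem_sub c h hc'.1 (by omega) hwu'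
    have hrs1v : pvVal rs.1 v = (pvDfsC c v).1 := by
      have := hsv.1
      rw [hinitv.1] at this
      rw [this, hdfseq]
    have hrs2v : pvVal rs.2 v = (pvDfsC c v).2 := by
      have := hsv.2
      rw [hinitv.2] at this
      rw [this, hdfseq]
      simp
    rw [hfoldall]
    rcases Nat.eq_zero_or_pos d with hd0 | hdpos
    · -- v is the root: its parent entry is -1 and the step is skipped
      subst hd0
      have hpz : c.pOf v = -1 := pvc_pOf_root c h
      have hskip : pvStep parF (rs.1, rs.2) v = (rs.1, rs.2) := by
        apply pvStep_skip
        rw [hparF v 0 h, hpz]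
      rw [hskip]
      refine ⟨hsL1, hsL2, ?_, ?_, by omega⟩
      · intro w hw
        rcases (hmemsub w).mp hw with he | ⟨u', hu', hwu'⟩
        · subst he
          exact ⟨hrs1v, hrs2v⟩
        · exact hsfin w (List.mem_flatMap.mpr ⟨u', hu', hwu'⟩)
      · intro w hw hwp
        apply hsun w
        · intro hwf
          rcases List.mem_flatMap.mp hwf with ⟨u', hu', hwu'⟩
          exact hw ((hmemsub w).mpr (Or.inr ⟨u', hu', hwu'⟩))
        · intro he
          exact hw (he ▸ hvin)
    · -- v has a parent: fold v's pair into it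
      have hdd : d = (d - 1) + 1 := by omega
      have hpar := pvc_parent c (hdd ▸ h)
      have hpb := pvc_bounds c hpar.1
      have hpne : ¬ pvVal parF v = -1 := by
        rw [hparF v d h]
        omega
      have hPne : c.pOf v ≠ v := pvc_label_ne c hpar.1 h (by omega)
      have hPnot : (c.pOf v) ∉ (c.ch v).flatMap (pvSubC c) := by
        intro hv2
        rcases List.mem_flatMap.mp hv2 with ⟨u', hu', hwu'⟩
        have hc' := pvc_ch_child c h hu'
        exact pv_not_mem_sub c hpar.1 hc'.1 (by omega) hwu'
      have hPun := hsun (c.pOf v) hPnot hPne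
      have hgo := pvStep_go parF (rs.1, rs.2) v hpne
      rw [hparF v d h] at hgo
      rw [hgo]
      have hw1 : 0 ≤ c.pOf v ∧ (c.pOf v).toNat < rs.1.length := by
        rw [hsL1, hLch]
        constructor
        · exact hpb.1
        · have := hpb.2.2
          omega
      have hw2 : 0 ≤ c.pOf v ∧ (c.pOf v).toNat < rs.2.length := by
        rw [hsL2, hLnc]
        constructor
        · exact hpb.1
        · have hdlt := pvc_depth_lt c hpar.1
          have := hpb.2.1
          omega
      have hchv : pvVal (pvSetAt rs.1 (c.pOf v) (pvVal rs.1 (c.pOf v) + pvVal rs.2 v)) v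
          = pvVal rs.1 v := by
        rw [pvVal_pvSetAt, if_neg (by intro hc; exact hPne hc.2.2.symm)]
      refine ⟨by rw [pvSetAt_length, hsL1], by rw [pvSetAt_length, hsL2], ?_, ?_, ?_⟩
      · intro w hw
        have hwP : w ≠ c.pOf v := by
          intro he
          rcases pvSubC_mem c h w hw with ⟨k, hk, _⟩
          exact (pvc_label_ne c hk hpar.1 (by omega)) (he ▸ rfl)
        rw [pvVal_pvSetAt, if_neg (by intro hc; exact hwP hc.2.2),
            pvVal_pvSetAt, if_neg (by intro hc; exact hwP hc.2.2)]
        rcases (hmemsub w).mp hw with he | ⟨u', hu', hwu'⟩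
        · subst he
          exact ⟨hrs1v, hrs2v⟩
        · exact hsfin w (List.mem_flatMap.mpr ⟨u', hu', hwu'⟩)
      · intro w hw hwP
        rw [pvVal_pvSetAt, if_neg (by intro hc; exact hwP hc.2.2),
            pvVal_pvSetAt, if_neg (by intro hc; exact hwP hc.2.2)]
        apply hsun w
        · intro hwf
          rcases List.mem_flatMap.mp hwf with ⟨u', hu', hwu'⟩
          exact hw ((hmemsub w).mpr (Or.inr ⟨u', hu', hwu'⟩))
        · intro he
          exact hw (he ▸ hvin)
      · intro _
        constructor
        · rw [pvVal_pvSetAt, if_pos ⟨hw1.1, hw1.2, rfl⟩, hPun.1, hrs2v]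
        · rw [pvVal_pvSetAt, if_pos ⟨hw2.1, hw2.2, rfl⟩, hPun.2, hchv, hrs1v, hrs2v]


-- ---- port B computes the same canonical values ----

theorem pvB_result (c : PvC) :
    maxScoreAfterOperations_alt c.n c.edges c.values = max (pvDfsC c 0).1 (pvDfsC c 0).2 := by
  have h0 := pvc_root c
  have hparF : ∀ (u : Int) (du : Nat), c.dp u = some du →
      pvVal ((pvSubC c 0).foldl (fun pa u => pvSetAt pa u (c.pOf u)) (List.replicate c.n.toNat (-1))) u
        = c.pOf u := by
    intro u du hu
    rw [pv_parfold_read c (pvSubC c 0) _ u (by simp)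
        (fun w hw => by
          rcases pvSubC_mem c h0 w hw with ⟨k, hk, _⟩
          exact ⟨0 + k, hk⟩)]
    rw [if_pos (pv_mem_sub0 c hu)]
  have hpost := pv_phase2 c _ hparF c.n.toNat h0 (by omega) c.values
    (List.replicate c.n.toNat 0) rfl (by simp)
    (fun u _ => ⟨rfl, by rw [pvVal_replicate]; split_ifs <;> rfl⟩)
  obtain ⟨_, _, hfin, _, _⟩ := hpost
  have h00 := hfin 0 (pvSubC_self c h0)
  unfold maxScoreAfterOperations_alt
  simp only [pv_phase1 c]
  rw [h00.1, h00.2]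

-- ===== VERDICT (by name: the statement is the Claim_ definition above) =====
theorem maxScoreAfterOperations_spec : Claim_equal_maxScoreAfterOperations := by
  intro n edges values _ hpre
  obtain ⟨h1, h1w, h2, h3, h4⟩ := hpre
  exact (pvA_result ⟨n, edges, values, h1, h1w, h2, h3, h4⟩).trans
    (pvB_result ⟨n, edges, values, h1, h1w, h2, h3, h4⟩).symm
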